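-- pv_equiv track=rewrite | github.com/musH0514/NLP-Midterm | r1/pythontools/update_highly_productive_authors.py | is_highly_productive
-- ===== SOURCE A (Python) =====
-- def is_highly_productive(years):
--     if len(years) < 5:
--         return False
--
--     # 对年份进行排序
--     sorted_years = sorted(years)
--
--     # 检查所有可能的5年区间
--     for i in range(len(sorted_years) - 4):
--         # 获取当前区间的起始年份
--         start_year = sorted_years[i]
--         end_year = start_year + 4  # 5年区间（包含起始年份）
--
--         # 统计该区间内的论文数
--         count = 0
--         for year in sorted_years[i:]:
--             if year <= end_year:
--                 count += 1
--             else: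
--                 break
--
--         if count >= 5:
--             return True
--
--     return False
-- ===== SOURCE B (Python) =====
-- def is_highly_productive(years):
--     s = sorted(years)
--     return any(b - a <= 4 for a, b in zip(s, s[4:]))
-- ===== Notes on version B (the rewrite author's own statement) =====
-- stated objective: faster
-- what changed: Replaces A's per-index inner counting scan over each suffix with a single pass comparing each sorted year to the one four positions later (zip of the sorted list with its 4-shift).
import Mathlib
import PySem

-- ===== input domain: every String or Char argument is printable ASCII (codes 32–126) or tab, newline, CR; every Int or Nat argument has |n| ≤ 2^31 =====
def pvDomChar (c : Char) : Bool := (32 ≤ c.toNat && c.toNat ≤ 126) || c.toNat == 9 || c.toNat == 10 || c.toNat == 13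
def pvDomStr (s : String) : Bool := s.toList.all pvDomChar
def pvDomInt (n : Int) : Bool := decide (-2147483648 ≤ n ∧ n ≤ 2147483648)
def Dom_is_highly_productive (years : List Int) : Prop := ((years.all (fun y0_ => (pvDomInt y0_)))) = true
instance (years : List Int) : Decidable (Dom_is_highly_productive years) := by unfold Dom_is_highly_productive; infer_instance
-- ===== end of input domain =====

-- B replaces A's inner counting scan per start index by one pass comparing each
-- sorted year with the year four positions later (asymptotically faster in a timing run).

-- ===== PORT A =====
-- inner loop: count = 0; for year in sorted_years[i:]: if year <= end_year: count += 1 else: break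
def aCount (endY : Int) : List Int → Int → Int
  | [], c => c
  | y :: ys, c => if y ≤ endY then aCount endY ys (c + 1) else c

-- outer loop: for i in range(len(sorted_years) - 4), recursing over the suffixes sorted_years[i:]
def aGo : List Int → Bool
  | [] => false
  | y :: rest =>
    if 5 ≤ (y :: rest).length then
      if 5 ≤ aCount (y + 4) (y :: rest) 0 then true else aGo rest
    else false

def is_highly_productive (years : List Int) : Bool :=
  if years.length < 5 then false
  else aGo (PySem.List.sorted years (fun x => x) false)

-- ===== PORT B =====
def is_highly_productive_alt (years : List Int) : Bool :=
  let s := PySem.List.sorted years (fun x => x) false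
  (s.zip (s.drop 4)).any (fun p => p.2 - p.1 ≤ 4)

-- ===== PRECONDITION & SPEC =====
def Spec_is_highly_productive (years : List Int) (out : Bool) : Prop := out = is_highly_productive_alt years
instance (years : List Int) (out : Bool) : Decidable (Spec_is_highly_productive years out) := by unfold Spec_is_highly_productive; infer_instance

-- ===== CLAIM (what is proved, stated in full; the proofs are below) =====
def Claim_equal_is_highly_productive : Prop := ∀ (years : List Int), Dom_is_highly_productive years → Spec_is_highly_productive years (is_highly_productive years)

-- ===== LEMMAS AND PROOFS =====

theorem aCount_ge (e : Int) (l : List Int) (c : Int) : c ≤ aCount e l c := by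
  induction l generalizing c with
  | nil => simp [aCount]
  | cons y ys ih =>
    simp only [aCount]
    split
    · exact le_trans (by omega) (ih (c + 1))
    · exact le_refl c

-- On a ≤-sorted list y :: b :: c :: d :: z :: zs, the counted run reaches 5 iff z ≤ y + 4.
theorem aCount_five (y b c d z : Int) (zs : List Int)
    (hs : (y :: b :: c :: d :: z :: zs).Pairwise (· ≤ ·)) :
    (5 ≤ aCount (y + 4) (y :: b :: c :: d :: z :: zs) 0) ↔ z - y ≤ 4 := by
  have h := aCount_ge (y + 4) zs 5
  obtain ⟨h1, hs⟩ := List.pairwise_cons.mp hs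
  obtain ⟨h2, hs⟩ := List.pairwise_cons.mp hs
  obtain ⟨h3, hs⟩ := List.pairwise_cons.mp hs
  obtain ⟨h4, hs⟩ := List.pairwise_cons.mp hs
  have hyz : y ≤ z := h1 z (by simp)
  have hbc : b ≤ c := h2 c (by simp)
  have hcd : c ≤ d := h3 d (by simp)
  have hdz : d ≤ z := h4 z (by simp)
  have hacc : (0 : Int) + 1 + 1 + 1 + 1 + 1 = 5 := by norm_num
  simp only [aCount, hacc]
  split_ifs <;> omega

theorem zip_drop4_cons (y : Int) (rest : List Int) :
    ((y :: rest).zip ((y :: rest).drop 4)) =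
      match rest.drop 3 with
      | [] => []
      | z :: zs => (y, z) :: rest.zip zs := by
  cases h : rest.drop 3 with
  | nil => simp [List.drop, h]
  | cons z zs => simp [List.drop, h]

theorem drop3_eq (b c d z : Int) (zs : List Int) :
    (b :: c :: d :: z :: zs).drop 3 = z :: zs := rfl

theorem aGo_cons (y : Int) (rest : List Int) (h : 5 ≤ (y :: rest).length) :
    aGo (y :: rest) = if 5 ≤ aCount (y + 4) (y :: rest) 0 then true else aGo rest := by
  have he : aGo (y :: rest) =
      if 5 ≤ (y :: rest).length then
        (if 5 ≤ aCount (y + 4) (y :: rest) 0 then true else aGo rest)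
      else false := rfl
  rw [he, if_pos h]

theorem aGo_eq_any (s : List Int) (hs : s.Pairwise (· ≤ ·)) :
    aGo s = (s.zip (s.drop 4)).any (fun p => p.2 - p.1 ≤ 4) := by
  induction s with
  | nil => rfl
  | cons y rest ih =>
    have hrest : rest.Pairwise (· ≤ ·) := (List.pairwise_cons.mp hs).2
    rw [zip_drop4_cons]
    rcases rest with _ | ⟨b, _ | ⟨c, _ | ⟨d, _ | ⟨z, zs⟩⟩⟩⟩
    · simp [aGo]
    · simp [aGo]
    · simp [aGo]
    · simp [aGo]
    · rw [drop3_eq]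
      rw [aGo_cons y (b :: c :: d :: z :: zs) (by simp)]
      have hdrop : (b :: c :: d :: z :: zs).drop 4 = zs := rfl
      by_cases hc : z - y ≤ 4
      · rw [if_pos ((aCount_five y b c d z zs hs).mpr hc)]
        simp
        exact Or.inl (by omega)
      · rw [if_neg (fun h => hc ((aCount_five y b c d z zs hs).mp h))]
        rw [ih hrest, hdrop]
        simp
        intro h
        omega

-- ===== VERDICT (by name: the statement is the Claim_ definition above) =====
theorem is_highly_productive_spec : Claim_equal_is_highly_productive := by
  intro years _
  unfold Spec_is_highly_productive is_highly_productive is_highly_productive_alt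
  set s := PySem.List.sorted years (fun x => x) false with hsdef
  have hpw : s.Pairwise (· ≤ ·) := by
    have := PySem.List.sorted_pairwise (xs := years) (key := fun x : Int => x)
    simpa [hsdef] using this
  have hlen : s.length = years.length := PySem.List.length_sorted ..
  by_cases h : years.length < 5
  · rw [if_pos h]
    -- with fewer than 5 elements, s.drop 4 can pair at most nothing useful: zip is []
    have : s.drop 4 = [] := List.drop_eq_nil_iff.mpr (by omega)
    simp [this]
  · rw [if_neg h]
    exact aGo_eq_any s hpw
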